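-- pv_equiv track=rewrite | github.com/Dylkln/Apta_Enrichment | family_in_files.py | create_profils
-- ===== SOURCE A (Python) =====
-- import operator
--
-- def extract_max_from_dict(dictionnaire):
--     """donne le maximum d'un dictionnaire.
--
--     Parameters
--     ----------
--     dictionnaire : dictionnary
--         un dictionnaire contenant des valeurs numériques
--
--     returns
--     -------
--     seq_len_max : int
--         la longueur de la séquence apparaissant le plus de fois dans
--         le dictionnaire fournit en argument.
--     """
--     seq_len_max = max(dictionnaire.items(), key = operator.itemgetter(1))[0]
--
--     return seq_len_max
--
-- def create_profils(compte, dic_b, common_seq):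
--     """créer le profil de chaque famille.
--
--     Parameters
--     ----------
--     compte : dictionnary
--         dictionnaire contenant chaque séquence d'une famille à un round donné
--
--     dic_b: dictionnary
--         dictionnaire contenant les séquences d'un round donné et leur
--         nombre d'occurrences.
--
--     common_seq: list
--         list contenant toutes les séquences communes à une famille donnée
--         à un round donné
--
--     Returns
--     -------
--     profils: dictionnary
--         dictionnaire contenant le profil de la famille donné à un round donné
--     """
--     profils = {}
--
--     seq_len_max = extract_max_from_dict(compte)
--
--     wanted_seq = [common_seq[i] for i in range(len(common_seq)) if len(common_seq[i]) == seq_len_max]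
--
--     for seq in wanted_seq:
--         for j, base in enumerate(seq):
--
--             if (j + 24) not in profils.keys():
--                 profils[j + 24] = {}
--
--             if base not in profils[j + 24].keys():
--                 profils[j + 24][base] = 1
--
--             else:
--                 profils[j + 24][base] += 1
--
--     return profils
-- ===== SOURCE B (Python) =====
-- import operator
-- from collections import Counter
--
--
-- def extract_max_from_dict(dictionnaire):
--     seq_len_max = max(dictionnaire.items(), key=operator.itemgetter(1))[0]
--     return seq_len_max
--
--
-- def create_profils(compte, dic_b, common_seq):
--     seq_len_max = extract_max_from_dict(compte)
--     wanted_seq = [s for s in common_seq if len(s) == seq_len_max]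
--     return {j + 24: dict(Counter(col))
--             for j, col in enumerate(zip(*wanted_seq))}
-- ===== Notes on version B (the rewrite author's own statement) =====
-- stated objective: idiomatic
-- what changed: Replaces the row-major nested loop with hand-rolled dict-of-dict bookkeeping by a column-wise pass: transpose the equal-length sequences with zip(*wanted_seq) and build each position's base counts with collections.Counter in a dict comprehension.
import Mathlib
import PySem

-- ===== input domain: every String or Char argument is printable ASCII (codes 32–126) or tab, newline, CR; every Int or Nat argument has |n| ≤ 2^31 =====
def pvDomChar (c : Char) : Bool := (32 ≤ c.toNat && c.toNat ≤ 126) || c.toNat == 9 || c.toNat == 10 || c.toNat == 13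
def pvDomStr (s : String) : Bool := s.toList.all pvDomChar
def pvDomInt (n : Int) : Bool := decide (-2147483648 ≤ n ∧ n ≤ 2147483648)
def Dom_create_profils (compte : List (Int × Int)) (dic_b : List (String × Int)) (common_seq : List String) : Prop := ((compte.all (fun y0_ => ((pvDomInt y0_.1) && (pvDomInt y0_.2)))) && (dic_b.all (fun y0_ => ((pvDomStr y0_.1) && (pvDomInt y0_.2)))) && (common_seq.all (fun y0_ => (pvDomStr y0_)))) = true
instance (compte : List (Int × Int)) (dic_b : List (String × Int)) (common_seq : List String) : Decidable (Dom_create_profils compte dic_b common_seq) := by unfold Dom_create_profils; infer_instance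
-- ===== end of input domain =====

-- B replaces A's row-major nested dict-of-dict bookkeeping by a column-wise pass (transpose +
-- per-position Counter); same cost, proved to return the same value (objective: idiomatic).

-- ===== PORT A =====
def extract_max_from_dict (dictionnaire : PySem.Dict Int Int) : Option Int :=
  (PySem.List.max? dictionnaire.items (fun p => p.2)).map (fun p => p.1)

-- one step of A's inner loop body, for the enumerated pair (j, base)
def pvStepA (profils : PySem.Dict Int (PySem.Dict String Int)) (jb : Int × Char) :
    PySem.Dict Int (PySem.Dict String Int) :=
  let k : Int := jb.1 + 24
  let b : String := String.ofList [jb.2]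
  let profils1 := if profils.contains k then profils else profils.insert k PySem.Dict.empty
  if (profils1.getD k PySem.Dict.empty).contains b then
    profils1.modify k PySem.Dict.empty (fun inner => inner.modify b 0 (· + 1))
  else
    profils1.modify k PySem.Dict.empty (fun inner => inner.insert b 1)

def create_profils (compte : List (Int × Int)) (dic_b : List (String × Int)) (common_seq : List String) : List (Int × List (String × Int)) :=
  match extract_max_from_dict (PySem.Dict.ofList compte) with
  | none => []  -- max() of an empty dict: Python raises ValueError; excluded by Pre_
  | some seq_len_max =>
    let wanted_seq := common_seq.filter (fun s => PySem.Str.len s == seq_len_max)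
    ((wanted_seq.foldl (fun profils seq =>
        (PySem.List.enumerate seq.toList).foldl pvStepA profils) PySem.Dict.empty)).items.map
      (fun p => (p.1, p.2.items))

-- ===== PORT B =====
-- zip(*ls): truncate to the shortest list, column by column
def pvZipStar (ls : List (List Char)) : List (List Char) :=
  let n := ((ls.map List.length).min?).getD 0
  (List.range n).map (fun j => ls.map (fun l => l.getD j ' '))

def create_profils_alt (compte : List (Int × Int)) (dic_b : List (String × Int)) (common_seq : List String) : List (Int × List (String × Int)) :=
  match extract_max_from_dict (PySem.Dict.ofList compte) with
  | none => []  -- same shared helper: Python raises ValueError; excluded by Pre_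
  | some seq_len_max =>
    let wanted_seq := common_seq.filter (fun s => PySem.Str.len s == seq_len_max)
    (PySem.List.enumerate (pvZipStar (wanted_seq.map String.toList))).map
      (fun jc => (jc.1 + 24, (PySem.Dict.counter (jc.2.map (fun c => String.ofList [c]))).items))

-- ===== PRECONDITION & SPEC =====
-- Pre_ excludes exactly compte = {}: there max() raises ValueError in A (and in B, which reuses the helper).
def Pre_create_profils (compte : List (Int × Int)) (dic_b : List (String × Int)) (common_seq : List String) : Prop := compte ≠ []
instance (compte : List (Int × Int)) (dic_b : List (String × Int)) (common_seq : List String) : Decidable (Pre_create_profils compte dic_b common_seq) := by unfold Pre_create_profils; infer_instance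
def pvWitness_create_profils : (List (Int × Int)) × (List (String × Int)) × List String :=
  ([(2, 3)], [("AC", 1)], ["AC", "GT", "A"])

def Spec_create_profils (compte : List (Int × Int)) (dic_b : List (String × Int)) (common_seq : List String) (out : List (Int × List (String × Int))) : Prop := out = create_profils_alt compte dic_b common_seq
instance (compte : List (Int × Int)) (dic_b : List (String × Int)) (common_seq : List String) (out : List (Int × List (String × Int))) : Decidable (Spec_create_profils compte dic_b common_seq out) := by unfold Spec_create_profils; infer_instance

-- ===== CLAIM (what is proved, stated in full; the proofs are below) =====
def Claim_equal_create_profils : Prop := ∀ (compte : List (Int × Int)) (dic_b : List (String × Int)) (common_seq : List String), Dom_create_profils compte dic_b common_seq → Pre_create_profils compte dic_b common_seq → Spec_create_profils compte dic_b common_seq (create_profils compte dic_b common_seq)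

-- ===== LEMMAS AND PROOFS =====

-- the profile dict rendered as an items list: positions i+24, i+25, ... with their inner dicts
def rowOut : Int → List (PySem.Dict String Int) → List (Int × PySem.Dict String Int)
  | _, [] => []
  | i, d :: t => (i + 24, d) :: rowOut (i + 1) t

theorem pv_any_false (pre : List (Int × PySem.Dict String Int)) (k : Int)
    (h : ∀ p ∈ pre, p.1 ≠ k) : (pre.any (fun p => p.1 == k)) = false := by
  simp only [List.any_eq_false, beq_iff_eq]
  exact h

theorem pv_find_none (pre : List (Int × PySem.Dict String Int)) (k : Int)
    (h : ∀ p ∈ pre, p.1 ≠ k) : pre.find? (fun p => p.1 == k) = none := by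
  rw [List.find?_eq_none]; intro p hp; simpa using h p hp

theorem pv_map_id (pre : List (Int × PySem.Dict String Int)) (k : Int) (v : PySem.Dict String Int)
    (h : ∀ p ∈ pre, p.1 ≠ k) :
    pre.map (fun p => if p.1 = k then (k, v) else p) = pre := by
  rw [List.map_congr_left (g := id), List.map_id]
  intro p hp; simp [h p hp]

theorem pvStepA_fresh (pre : List (Int × PySem.Dict String Int)) (i : Int) (c : Char)
    (h : ∀ p ∈ pre, p.1 < i + 24) :
    pvStepA (PySem.Dict.mk pre) (i, c)
      = PySem.Dict.mk (pre ++ [(i + 24, PySem.Dict.mk [(String.ofList [c], 1)])]) := by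
  have hne : ∀ p ∈ pre, p.1 ≠ i + 24 := fun p hp => by have := h p hp; omega
  have hany := pv_any_false pre (i + 24) hne
  have hfind := pv_find_none pre (i + 24) hne
  have hmap := pv_map_id pre (i + 24) (PySem.Dict.mk [(String.ofList [c], 1)]) hne
  simp [pvStepA, PySem.Dict.contains, PySem.Dict.insert, PySem.Dict.getD, PySem.Dict.get?,
    PySem.Dict.modify, PySem.Dict.empty, hany, hfind, hmap, List.find?_append]

theorem foldl_stepA_fresh (s : List Char) : ∀ (i : Int) (pre : List (Int × PySem.Dict String Int)),
    (∀ p ∈ pre, p.1 < i + 24) →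
    ((PySem.List.enumerate s i).foldl pvStepA (PySem.Dict.mk pre)).items
      = pre ++ rowOut i (s.map (fun c => PySem.Dict.mk [(String.ofList [c], 1)])) := by
  induction s with
  | nil => intro i pre h; simp [PySem.List.enumerate, rowOut]
  | cons c t ih =>
    intro i pre h
    have : PySem.List.enumerate (c :: t) i = (i, c) :: PySem.List.enumerate t (i + 1) := rfl
    rw [this, List.foldl_cons, pvStepA_fresh pre i c h,
      ih (i + 1) (pre ++ [(i + 24, PySem.Dict.mk [(String.ofList [c], 1)])])
        (by intro p hp; rcases List.mem_append.1 hp with h1 | h1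
            · have := h p h1; omega
            · have : p.1 = i + 24 := by simp at h1; simp [h1]
              omega)]
    simp [rowOut]

theorem rowOut_keys_ge (ds : List (PySem.Dict String Int)) : ∀ (i : Int),
    ∀ p ∈ rowOut i ds, i + 24 ≤ p.1 := by
  induction ds with
  | nil => intro i p hp; simp [rowOut] at hp
  | cons d t ih =>
    intro i p hp
    simp only [rowOut, List.mem_cons] at hp
    rcases hp with rfl | hp
    · omega
    · have := ih (i + 1) p hp; omega

theorem pvStepA_update (pre : List (Int × PySem.Dict String Int)) (i : Int) (c : Char)
    (d : PySem.Dict String Int) (t : List (PySem.Dict String Int))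
    (h : ∀ p ∈ pre, p.1 < i + 24) :
    pvStepA (PySem.Dict.mk (pre ++ rowOut i (d :: t))) (i, c)
      = PySem.Dict.mk (pre ++ (i + 24, d.modify (String.ofList [c]) 0 (· + 1)) :: rowOut (i + 1) t) := by
  have hne : ∀ p ∈ pre, p.1 ≠ i + 24 := fun p hp => by have := h p hp; omega
  have hne' : ∀ p ∈ rowOut (i + 1) t, p.1 ≠ i + 24 := fun p hp => by
    have := rowOut_keys_ge t (i + 1) p hp; omega
  have hfind := pv_find_none pre (i + 24) hne
  have hmap := pv_map_id pre (i + 24) (d.modify (String.ofList [c]) 0 (· + 1)) hne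
  have hmap' := pv_map_id (rowOut (i + 1) t) (i + 24) (d.modify (String.ofList [c]) 0 (· + 1)) hne'
  have hget? : (PySem.Dict.mk (pre ++ rowOut i (d :: t))).get? (i + 24) = some d := by
    simp [PySem.Dict.get?, List.find?_append, hfind, rowOut]
  have hget : (PySem.Dict.mk (pre ++ rowOut i (d :: t))).getD (i + 24) PySem.Dict.empty = d := by
    simp [PySem.Dict.getD, hget?]
  have hcont : (PySem.Dict.mk (pre ++ rowOut i (d :: t))).contains (i + 24) = true := by
    simp [PySem.Dict.contains, rowOut]
  rw [show pvStepA (PySem.Dict.mk (pre ++ rowOut i (d :: t))) (i, c)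
      = (if ((PySem.Dict.mk (pre ++ rowOut i (d :: t))).getD (i + 24) PySem.Dict.empty).contains (String.ofList [c]) then
          (PySem.Dict.mk (pre ++ rowOut i (d :: t))).modify (i + 24) PySem.Dict.empty (fun inner => inner.modify (String.ofList [c]) 0 (· + 1))
        else
          (PySem.Dict.mk (pre ++ rowOut i (d :: t))).modify (i + 24) PySem.Dict.empty (fun inner => inner.insert (String.ofList [c]) 1))
      from by simp [pvStepA, hcont]]
  have hbranch : (if (d.contains (String.ofList [c])) then
          (PySem.Dict.mk (pre ++ rowOut i (d :: t))).modify (i + 24) PySem.Dict.empty (fun inner => inner.modify (String.ofList [c]) 0 (· + 1))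
        else
          (PySem.Dict.mk (pre ++ rowOut i (d :: t))).modify (i + 24) PySem.Dict.empty (fun inner => inner.insert (String.ofList [c]) 1))
      = (PySem.Dict.mk (pre ++ rowOut i (d :: t))).insert (i + 24) (d.modify (String.ofList [c]) 0 (· + 1)) := by
    by_cases hb : d.contains (String.ofList [c]) = true
    · simp [hb, PySem.Dict.modify, hget]
    · have hb' : d.contains (String.ofList [c]) = false := by simpa using hb
      have hg : d.get? (String.ofList [c]) = none := (PySem.Dict.get?_eq_none_iff_contains d _).2 hb'
      simp [hb', PySem.Dict.modify, hget?, PySem.Dict.getD, hg]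
  rw [hget, hbranch]
  simp [PySem.Dict.insert, rowOut, hmap, hmap']

theorem foldl_stepA_update (s : List Char) :
    ∀ (ds : List (PySem.Dict String Int)) (i : Int) (pre : List (Int × PySem.Dict String Int)),
    s.length = ds.length → (∀ p ∈ pre, p.1 < i + 24) →
    ((PySem.List.enumerate s i).foldl pvStepA (PySem.Dict.mk (pre ++ rowOut i ds))).items
      = pre ++ rowOut i (List.zipWith (fun c d => d.modify (String.ofList [c]) 0 (· + 1)) s ds) := by
  induction s with
  | nil =>
    intro ds i pre hlen h
    have : ds = [] := by simpa using (List.length_eq_zero_iff).1 hlen.symm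
    subst this
    simp [PySem.List.enumerate, rowOut]
  | cons c t ih =>
    intro ds i pre hlen h
    cases ds with
    | nil => simp at hlen
    | cons d dt =>
      have : PySem.List.enumerate (c :: t) i = (i, c) :: PySem.List.enumerate t (i + 1) := rfl
      rw [this, List.foldl_cons, pvStepA_update pre i c d dt h]
      have hre : pre ++ (i + 24, d.modify (String.ofList [c]) 0 (· + 1)) :: rowOut (i + 1) dt
          = (pre ++ [(i + 24, d.modify (String.ofList [c]) 0 (· + 1))]) ++ rowOut (i + 1) dt := by
        simp
      rw [hre, ih dt (i + 1) (pre ++ [(i + 24, d.modify (String.ofList [c]) 0 (· + 1))])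
        (by simpa using hlen)
        (by intro p hp; rcases List.mem_append.1 hp with h1 | h1
            · have := h p h1; omega
            · have : p.1 = i + 24 := by simp at h1; simp [h1]
              omega)]
      simp [rowOut, List.zipWith]

theorem foldl_rows (ws : List (List Char)) : ∀ (ds : List (PySem.Dict String Int)),
    (∀ s ∈ ws, s.length = ds.length) →
    ((ws.foldl (fun d s => (PySem.List.enumerate s).foldl pvStepA d) (PySem.Dict.mk (rowOut 0 ds)))).items
      = rowOut 0 (ws.foldl (fun ds s => List.zipWith (fun c d => d.modify (String.ofList [c]) 0 (· + 1)) s ds) ds) := by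
  induction ws with
  | nil => intro ds h; simp
  | cons s rest ih =>
    intro ds h
    rw [List.foldl_cons, List.foldl_cons]
    have hstep : (PySem.List.enumerate s).foldl pvStepA (PySem.Dict.mk (rowOut 0 ds))
        = PySem.Dict.mk (rowOut 0 (List.zipWith (fun c d => d.modify (String.ofList [c]) 0 (· + 1)) s ds)) := by
      apply PySem.Dict.ext
      have := foldl_stepA_update s ds 0 [] (h s (by simp)) (by simp)
      simpa using this
    rw [hstep, ih _ (by
      intro s' hs'
      rw [h s' (by simp [hs'])]
      have : (List.zipWith (fun c d => d.modify (String.ofList [c]) 0 (· + 1)) s ds).length = min s.length ds.length := List.length_zipWith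
      rw [this, h s (by simp)]; omega)]

theorem foldl_zip_length (ws : List (List Char)) : ∀ (ds : List (PySem.Dict String Int)),
    (∀ s ∈ ws, s.length = ds.length) →
    (ws.foldl (fun ds s => List.zipWith (fun c d => d.modify (String.ofList [c]) 0 (· + 1)) s ds) ds).length = ds.length := by
  induction ws with
  | nil => intro ds h; simp
  | cons s rest ih =>
    intro ds h
    rw [List.foldl_cons]
    have h1 : (List.zipWith (fun c d => d.modify (String.ofList [c]) 0 (· + 1)) s ds).length = ds.length := by
      rw [List.length_zipWith, h s (by simp)]; omega
    rw [ih _ (by intro s' hs'; rw [h s' (by simp [hs']), h1]), h1]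

theorem foldl_zip_getElem (ws : List (List Char)) : ∀ (ds : List (PySem.Dict String Int)) (j : Nat)
    (hws : ∀ s ∈ ws, s.length = ds.length) (hj : j < ds.length)
    (hj' : j < (ws.foldl (fun ds s => List.zipWith (fun c d => d.modify (String.ofList [c]) 0 (· + 1)) s ds) ds).length),
    (ws.foldl (fun ds s => List.zipWith (fun c d => d.modify (String.ofList [c]) 0 (· + 1)) s ds) ds)[j]'hj'
      = (ws.map (fun s => s.getD j ' ')).foldl (fun d c => d.modify (String.ofList [c]) 0 (· + 1)) (ds[j]'hj) := by
  induction ws with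
  | nil => intro ds j _ hj hj'; simp
  | cons s rest ih =>
    intro ds j hws hj hj'
    have h1 : (List.zipWith (fun c d => d.modify (String.ofList [c]) 0 (· + 1)) s ds).length = ds.length := by
      rw [List.length_zipWith, hws s (by simp)]; omega
    simp only [List.foldl_cons, List.map_cons]
    rw [ih _ j (by intro s' hs'; rw [hws s' (by simp [hs']), h1]) (by omega)
      (by simpa only [List.foldl_cons] using hj')]
    congr 1
    have hjs : j < s.length := by rw [hws s (by simp)]; exact hj
    rw [List.getElem_zipWith, List.getD_eq_getElem s ' ' hjs]

theorem min?_all_eq (l : List Nat) (n : Nat) (hne : l ≠ []) (h : ∀ x ∈ l, x = n) :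
    l.min? = some n := by
  rcases hm : l.min? with _ | m
  · exact absurd (List.min?_eq_none_iff.1 hm) hne
  · rw [h m (List.min?_mem hm)]

theorem counter_single (b : String) :
    PySem.Dict.mk [(b, (1 : Int))] = PySem.Dict.empty.modify b 0 (· + 1) := by
  simp [PySem.Dict.modify, PySem.Dict.insert, PySem.Dict.contains, PySem.Dict.getD,
    PySem.Dict.get?, PySem.Dict.empty]

theorem enum_map_rowOut (cols : List (List Char)) : ∀ (i : Int),
    (PySem.List.enumerate cols i).map
        (fun jc => (jc.1 + 24, (PySem.Dict.counter (jc.2.map (fun c => String.ofList [c]))).items))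
      = (rowOut i (cols.map (fun col => PySem.Dict.counter (col.map (fun c => String.ofList [c]))))).map
          (fun p => (p.1, p.2.items)) := by
  induction cols with
  | nil => intro i; simp [PySem.List.enumerate, rowOut]
  | cons c t ih => intro i; simp only [PySem.List.enumerate, List.map_cons, rowOut]; simp [ih (i + 1)]

theorem core (ws : List (List Char)) (n : Nat) (h : ∀ s ∈ ws, s.length = n) :
    ((ws.foldl (fun d s => (PySem.List.enumerate s).foldl pvStepA d) PySem.Dict.empty)).items.map
        (fun p => (p.1, p.2.items))
      = (PySem.List.enumerate (pvZipStar ws)).map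
          (fun jc => (jc.1 + 24, (PySem.Dict.counter (jc.2.map (fun c => String.ofList [c]))).items)) := by
  cases ws with
  | nil => simp [pvZipStar, PySem.Dict.empty]
  | cons s0 rest =>
    have hn : s0.length = n := h s0 (by simp)
    set ds0 : List (PySem.Dict String Int) := s0.map (fun c => PySem.Dict.mk [(String.ofList [c], 1)]) with hds0
    have hlds0 : ds0.length = n := by simp [hds0, hn]
    have hrest : ∀ s ∈ rest, s.length = ds0.length := by
      intro s hs; rw [hlds0]; exact h s (by simp [hs])
    have hfirst : (PySem.List.enumerate s0).foldl pvStepA PySem.Dict.empty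
        = PySem.Dict.mk (rowOut 0 ds0) := by
      apply PySem.Dict.ext
      have := foldl_stepA_fresh s0 0 [] (by simp)
      simpa [PySem.Dict.empty] using this
    have hmin : (((s0 :: rest).map List.length).min?) = some n := by
      apply min?_all_eq _ n (by simp)
      intro x hx
      simp only [List.map_cons, List.mem_cons, List.mem_map] at hx
      rcases hx with rfl | ⟨s, hs, rfl⟩
      · exact hn
      · exact h s (by simp [hs])
    have hzip : pvZipStar (s0 :: rest)
        = (List.range n).map (fun j => (s0 :: rest).map (fun l => l.getD j ' ')) := by
      simp only [pvZipStar]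
      rw [hmin]
      rfl
    rw [List.foldl_cons, hfirst, foldl_rows rest ds0 hrest, hzip, enum_map_rowOut]
    congr 1
    congr 1
    apply List.ext_getElem
    · rw [foldl_zip_length rest ds0 hrest, hlds0]; simp
    · intro j hj1 hj2
      have hjn : j < n := by rw [foldl_zip_length rest ds0 hrest, hlds0] at hj1; exact hj1
      rw [foldl_zip_getElem rest ds0 j hrest (by omega) hj1]
      have hjs0 : j < s0.length := by omega
      have hds0j : ds0[j]'(by omega) = PySem.Dict.empty.modify (String.ofList [s0[j]]) 0 (· + 1) := by
        simp [hds0, counter_single]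
      rw [hds0j]
      simp only [List.getElem_map, List.getElem_range]
      rw [PySem.Dict.counter_eq_foldl]
      simp [List.foldl_map, List.getElem?_eq_getElem hjs0]

-- ===== VERDICT (by name: the statement is the Claim_ definition above) =====
theorem create_profils_spec : Claim_equal_create_profils := by
  intro compte dic_b common_seq _ _
  unfold Spec_create_profils create_profils create_profils_alt
  rcases hmax : extract_max_from_dict (PySem.Dict.ofList compte) with _ | L
  · rfl
  · simp only
    set wanted := common_seq.filter (fun s => PySem.Str.len s == L) with hw
    have hall : ∀ x ∈ wanted.map String.toList, (x.length : Int) = L := by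
      intro x hx
      rcases List.mem_map.1 hx with ⟨s', hs', rfl⟩
      have := (List.mem_filter.1 hs').2
      simpa [PySem.Str.len] using this
    have hlen : ∀ s ∈ wanted.map String.toList, s.length = ((wanted.map String.toList).headD []).length := by
      intro s hs
      rcases hwl : wanted.map String.toList with _ | ⟨w0, t⟩
      · rw [hwl] at hs; simp at hs
      · have h1 := hall s hs
        have h2 := hall w0 (by rw [hwl]; simp)
        simp only [List.headD_cons]
        omega
    have hcore := core (wanted.map String.toList) _ hlen
    rw [List.foldl_map] at hcore
    exact hcore
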